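-- pv_equiv track=rewrite | github.com/fgallegosalido/Algorithms | Hackerrank/ProjecEuler/26__Reciprocal_cycles.py | is_reptend
-- ===== SOURCE A (Python) =====
-- def is_reptend(n):
--     if n < 7:
--         return False
--
--     l = []
--     for i in range(1, n):
--         l.append(pow(10, i, n))
--
--     if len(set(l)) == n-1:
--         return True
--     else:
--         return False
-- ===== SOURCE B (Python) =====
-- def is_reptend(n):
--     if n < 7:
--         return False
--     seen = set()
--     x = 10 % n
--     while x not in seen and len(seen) < n - 1:
--         seen.add(x)
--         x = x * 10 % n
--     return len(seen) == n - 1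
-- ===== Notes on version B (the rewrite author's own statement) =====
-- stated objective: faster
-- what changed: Instead of materialising all n-1 modular powers of ten in a list and deduplicating it at the end, B walks the residues incrementally (x = x*ten mod n) with a growing set and exits on the first repeated residue, which for non-full-reptend n happens after only ord(ten mod n) steps.
import Mathlib
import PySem

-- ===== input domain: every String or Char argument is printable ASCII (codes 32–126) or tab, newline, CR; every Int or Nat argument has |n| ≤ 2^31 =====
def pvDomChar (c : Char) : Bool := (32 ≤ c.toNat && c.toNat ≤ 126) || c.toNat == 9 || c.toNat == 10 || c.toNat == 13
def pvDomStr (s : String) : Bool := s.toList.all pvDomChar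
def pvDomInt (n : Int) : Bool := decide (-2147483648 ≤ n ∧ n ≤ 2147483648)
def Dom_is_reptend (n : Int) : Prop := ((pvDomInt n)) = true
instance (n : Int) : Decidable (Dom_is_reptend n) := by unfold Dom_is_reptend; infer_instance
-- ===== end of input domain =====

-- B replaces A's "build all n-1 powers, then dedup" by an incremental orbit walk with
-- early exit on the first repeated residue (objective: faster).

-- ===== PORT A =====
-- pow(10, i, n): exact for i ≥ 0 and n > 0 (here i ≥ 1 and n ≥ 7; Int.emod = Python % for positive modulus)
def powmod10 (i n : Int) : Int := ((10 : Int) ^ i.toNat) % n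

def is_reptend (n : Int) : Bool :=
  if n < 7 then false
  else
    let l := (PySem.List.pyRange 1 n 1).foldl (fun l i => l ++ [powmod10 i n]) []
    if ((PySem.Set.ofList l).length : Int) = n - 1 then true else false

-- ===== PORT B =====
-- the while loop; fuel (n-1).toNat never runs out: each iteration needs seen.length < n-1
-- and enlarges seen by one, so there are at most n-1 iterations
def altLoop (n : Int) : Nat → PySem.Set Int → Int → PySem.Set Int
  | 0, seen, _ => seen
  | fuel+1, seen, x =>
    if x ∉ seen ∧ ((seen.length : Int) < n - 1) then
      altLoop n fuel (PySem.Set.add seen x) (x * 10 % n)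
    else seen

def is_reptend_alt (n : Int) : Bool :=
  if n < 7 then false
  else
    let seen := altLoop n (n - 1).toNat PySem.Set.empty (10 % n)
    decide ((seen.length : Int) = n - 1)

-- ===== PRECONDITION & SPEC =====
def Spec_is_reptend (n : Int) (out : Bool) : Prop := out = is_reptend_alt n
instance (n : Int) (out : Bool) : Decidable (Spec_is_reptend n out) := by unfold Spec_is_reptend; infer_instance

-- ===== CLAIM (what is proved, stated in full; the proofs are below) =====
def Claim_equal_is_reptend : Prop := ∀ (n : Int), Dom_is_reptend n → Spec_is_reptend n (is_reptend n)

-- ===== LEMMAS AND PROOFS =====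

-- the orbit of x under (· * 10 % n), as a list of k terms
def chain (n : Int) : Int → Nat → List Int
  | _, 0 => []
  | x, k+1 => x :: chain n (x * 10 % n) k

theorem foldl_append_singleton (f : Int → Int) :
    ∀ (xs : List Int) (acc : List Int),
      xs.foldl (fun l i => l ++ [f i]) acc = acc ++ xs.map f := by
  intro xs
  induction xs with
  | nil => simp [List.foldl]
  | cons a t ih => intro acc; simp [List.foldl, ih]

theorem step_pow (n : Int) (j : Nat) :
    (10 ^ j % n) * 10 % n = 10 ^ (j + 1) % n := by
  conv_lhs => rw [Int.mul_emod]
  rw [Int.emod_emod_of_dvd _ dvd_rfl, ← Int.mul_emod, ← pow_succ]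

theorem range_map_chain (n : Int) :
    ∀ (m j : Nat),
      (List.range m).map (fun k => 10 ^ (j + 1 + k) % n) = chain n (10 ^ (j + 1) % n) m := by
  intro m
  induction m with
  | zero => intro j; simp [chain]
  | succ m ih =>
    intro j
    rw [List.range_succ_eq_map]
    simp only [List.map_cons, List.map_map]
    rw [chain]
    congr 1
    rw [step_pow, ← ih (j + 1)]
    apply List.map_congr_left
    intro k _
    simp only [Function.comp]
    have he : j + 1 + Nat.succ k = j + 1 + 1 + k := by omega
    rw [he]

theorem update_length_le (s : PySem.Set Int) (l : List Int) :
    (PySem.Set.update s l).length ≤ s.length + l.length := by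
  rw [PySem.Set.update_eq_append_filter]
  have h1 : ((PySem.Set.ofList l).filter (fun y => !(PySem.Set.contains s y))).length
      ≤ (PySem.Set.ofList l).length := List.length_filter_le _ _
  have h2 := PySem.Set.length_ofList_le (xs := l)
  rw [List.length_append]
  omega

-- core invariant: fuel + seen.length = m, so the size cap is exactly "fuel left"
theorem altLoop_length (n : Int) (m : Nat) (hm : (m : Int) = n - 1) :
    ∀ (k : Nat) (seen : PySem.Set Int) (x : Int),
      seen.length + k = m →
      ((altLoop n k seen x).length = m ↔ (PySem.Set.update seen (chain n x k)).length = m) := by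
  intro k
  induction k with
  | zero =>
    intro seen x hlen
    simp [altLoop, chain, PySem.Set.update]
  | succ k ih =>
    intro seen x hlen
    have hcap : ((seen.length : Int) < n - 1) := by omega
    rw [altLoop, chain, PySem.Set.update_cons]
    by_cases hx : x ∈ seen
    · have hadd : PySem.Set.add seen x = seen := PySem.Set.add_of_mem hx
      rw [if_neg (by simp [hx]), hadd]
      have hub := update_length_le seen (chain n (x * 10 % n) k)
      have hchainlen : ∀ (y : Int) (j : Nat), (chain n y j).length = j := by
        intro y j
        induction j generalizing y with
        | zero => simp [chain]
        | succ j ihc => simp [chain, ihc]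
      rw [hchainlen] at hub
      constructor
      · intro h; omega
      · intro h; omega
    · rw [if_pos ⟨hx, hcap⟩]
      apply ih
      rw [PySem.Set.add_of_not_mem hx]
      simp only [List.length_append, List.length_cons, List.length_nil]
      omega

-- ===== VERDICT (by name: the statement is the Claim_ definition above) =====
theorem is_reptend_spec : Claim_equal_is_reptend := by
  intro n _
  unfold Spec_is_reptend is_reptend is_reptend_alt
  by_cases h7 : n < 7
  · simp [h7]
  · rw [if_neg h7, if_neg h7]
    have hm : (((n - 1).toNat : Int)) = n - 1 := by omega
    -- A's list is the chain starting at 10 % n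
    have hl : (PySem.List.pyRange 1 n 1).foldl (fun l i => l ++ [powmod10 i n]) []
        = chain n (10 % n) (n - 1).toNat := by
      rw [foldl_append_singleton]
      rw [PySem.List.pyRange_one]
      simp only [List.nil_append, List.map_map]
      have heq : ((List.range (n - 1).toNat).map ((fun i => powmod10 i n) ∘ fun k : Nat => 1 + (k : Int)))
          = (List.range (n - 1).toNat).map (fun k => 10 ^ (0 + 1 + k) % n) := by
        apply List.map_congr_left
        intro k _
        simp only [Function.comp, powmod10]
        congr 1
      rw [heq, range_map_chain n (n - 1).toNat 0]
      norm_num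
    rw [hl]
    -- B's loop from the empty set
    have hB := altLoop_length n (n - 1).toNat hm (n - 1).toNat PySem.Set.empty (10 % n)
      (by simp [PySem.Set.empty])
    have hupd : PySem.Set.update PySem.Set.empty (chain n (10 % n) (n - 1).toNat)
        = PySem.Set.ofList (chain n (10 % n) (n - 1).toNat) :=
      PySem.Set.update_nil_left _
    rw [hupd] at hB
    have key : (((PySem.Set.ofList (chain n (10 % n) (n - 1).toNat)).length : Int) = n - 1)
        ↔ (((altLoop n (n - 1).toNat PySem.Set.empty (10 % n)).length : Int) = n - 1) := by
      constructor
      · intro h; have := hB.mpr (by omega); omega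
      · intro h; have := hB.mp (by omega); omega
    by_cases hc : ((PySem.Set.ofList (chain n (10 % n) (n - 1).toNat)).length : Int) = n - 1
    · rw [if_pos hc]
      exact (decide_eq_true (key.mp hc)).symm
    · rw [if_neg hc]
      exact (decide_eq_false (fun h => hc (key.mpr h))).symm
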